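-- pv_equiv track=rewrite | github.com/kstrukov94/Course | Tasks_difficult/8_Loops/3_spruce.py | spruce
-- ===== SOURCE A (Python) =====
-- def spruce(end_number):
--     current_number = 1
--     numbers_per_line = 1
--     # Список для хранения сформированных строк.
--     lines = []
--
--     # Общий цикл.
--     while current_number <= end_number:
--
--         # Список для формирования одной строки:
--         line = []
--
--         # Вложенный список для формирования строки.
--         while len(line) < numbers_per_line and current_number <= end_number:
--             line.append(str(current_number))
--             current_number += 1
--         numbers_per_line += 1
--
--         # Добавляем строку в список строк.
--         lines.append(" ".join(line))
--
--     # Выводим результат.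
--     return "\n".join(lines)
-- ===== SOURCE B (Python) =====
-- def spruce(end_number):
--     # Phase 1: build the full flat list of stringified numbers.
--     nums = [str(i) for i in range(1, end_number + 1)]
--     # Phase 2: partition it into rows of growing size 1, 2, 3, ...
--     lines = []
--     start = 0
--     size = 1
--     while start < len(nums):
--         lines.append(" ".join(nums[start:start + size]))
--         start += size
--         size += 1
--     return "\n".join(lines)
-- ===== Notes on version B (the rewrite author's own statement) =====
-- stated objective: alternative
-- what changed: Replaced the counter-threaded nested while loops by a two-phase computation: first build the flat list of stringified numbers with one range comprehension, then partition it into rows by slicing at a running start index with a growing row size.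
import Mathlib
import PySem

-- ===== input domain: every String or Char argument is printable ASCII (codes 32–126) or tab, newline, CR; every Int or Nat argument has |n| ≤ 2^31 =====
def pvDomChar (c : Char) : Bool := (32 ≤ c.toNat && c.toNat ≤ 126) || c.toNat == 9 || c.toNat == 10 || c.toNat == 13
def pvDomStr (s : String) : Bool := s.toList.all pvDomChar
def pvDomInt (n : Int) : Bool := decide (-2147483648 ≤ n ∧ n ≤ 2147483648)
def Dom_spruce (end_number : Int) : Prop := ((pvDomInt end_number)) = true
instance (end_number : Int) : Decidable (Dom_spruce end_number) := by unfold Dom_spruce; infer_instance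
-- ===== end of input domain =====

-- B builds the flat list of stringified numbers first, then partitions it into rows
-- of growing size by repeated slicing (alternative decomposition; same cost).

-- ===== PORT A =====
-- Inner while loop: 'while len(line) < numbers_per_line and current_number <= end_number',
-- carried with k = numbers_per_line - len(line) remaining slots; returns (line, current_number).
def spruceInner (k : Nat) (cur e : Int) : List String × Int :=
  match k with
  | 0 => ([], cur)
  | k + 1 =>
    if cur ≤ e then
      let p := spruceInner k (cur + 1) e
      (PySem.Int.toStr cur :: p.1, p.2)
    else ([], cur)

theorem spruceInner_le_snd (k : Nat) : ∀ cur e : Int, cur ≤ (spruceInner k cur e).2 := by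
  induction k with
  | zero => intro cur e; simp [spruceInner]
  | succ k ih =>
    intro cur e
    simp only [spruceInner]
    split
    · exact le_trans (by omega) (ih (cur + 1) e)
    · simp

-- Outer while loop; n + 1 = numbers_per_line (it starts at 1 and only grows).
def spruceOuter (cur : Int) (n : Nat) (e : Int) : List String :=
  if h : cur ≤ e then
    let p := spruceInner (n + 1) cur e
    PySem.Str.join " " p.1 :: spruceOuter p.2 (n + 1) e
  else []
termination_by (e + 1 - cur).toNat
decreasing_by
  have h2 := spruceInner_le_snd n (cur + 1) e
  simp only [spruceInner, if_pos h] at *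
  omega

def spruce (end_number : Int) : String :=
  PySem.Str.join "\n" (spruceOuter 1 0 end_number)

-- ===== PORT B =====
-- Partition loop of Source B: 'while start < len(nums): append " ".join(nums[start:start+size]);
-- start += size; size += 1'; n + 1 = size (it starts at 1 and only grows).
def spruceRows (nums : List String) (start n : Nat) : List String :=
  if start < nums.length then
    PySem.Str.join " " (PySem.List.slice nums (some (start : Int)) (some ((start + (n + 1) : Nat) : Int))) ::
      spruceRows nums (start + (n + 1)) (n + 1)
  else []
termination_by nums.length - start

def spruce_alt (end_number : Int) : String :=
  let nums := (PySem.List.pyRange 1 (end_number + 1) 1).map PySem.Int.toStr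
  PySem.Str.join "\n" (spruceRows nums 0 0)

-- ===== PRECONDITION & SPEC =====
def Spec_spruce (end_number : Int) (out : String) : Prop := out = spruce_alt end_number
instance (end_number : Int) (out : String) : Decidable (Spec_spruce end_number out) := by unfold Spec_spruce; infer_instance

-- ===== CLAIM (what is proved, stated in full; the proofs are below) =====
def Claim_equal_spruce : Prop := ∀ (end_number : Int), Dom_spruce end_number → Spec_spruce end_number (spruce end_number)

-- ===== LEMMAS AND PROOFS =====

-- Proof-only view of B's partition loop: the rows of the part of nums not yet consumed.
def rowsD : List String → Nat → List String
  | [], _ => []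
  | x :: xs, n =>
    PySem.Str.join " " (List.take (n + 1) (x :: xs)) :: rowsD (List.drop (n + 1) (x :: xs)) (n + 1)
termination_by nums _ => nums.length
decreasing_by simp

theorem rowsD_nil (n : Nat) : rowsD [] n = [] := by rw [rowsD.eq_def]

theorem rowsD_cons (x : String) (xs : List String) (n : Nat) :
    rowsD (x :: xs) n =
      PySem.Str.join " " (List.take (n + 1) (x :: xs)) :: rowsD (List.drop (n + 1) (x :: xs)) (n + 1) := by
  rw [rowsD.eq_def]

theorem spruceRows_eq_rowsD (nums : List String) : ∀ (start n : Nat),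
    spruceRows nums start n = rowsD (nums.drop start) n := by
  intro start
  induction hs : nums.length - start using Nat.strong_induction_on generalizing start with
  | _ k ih =>
    intro n
    rw [spruceRows]
    split
    · rename_i h
      rw [PySem.List.slice_natCast]
      have hb : start + (n + 1) - start = n + 1 := by omega
      rw [hb]
      obtain ⟨x, xs, hx⟩ : ∃ x xs, nums.drop start = x :: xs := by
        rcases hd : nums.drop start with _ | ⟨x, xs⟩
        · exfalso; have := List.drop_eq_nil_iff.mp hd; omega
        · exact ⟨x, xs, rfl⟩
      rw [hx, rowsD_cons, ← hx, List.drop_drop]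
      subst hs
      rw [ih (nums.length - (start + (n + 1))) (by omega) (start + (n + 1)) rfl]
    · rename_i h
      rw [List.drop_eq_nil_iff.mpr (by omega), rowsD_nil]

theorem spruceInner_spec (k : Nat) : ∀ cur e : Int,
    spruceInner k cur e =
      (((PySem.List.pyRange cur (e + 1) 1).take k).map PySem.Int.toStr,
        cur + (min k (e + 1 - cur).toNat : Nat)) := by
  induction k with
  | zero => intro cur e; simp [spruceInner]
  | succ k ih =>
    intro cur e
    simp only [spruceInner]
    split
    · rename_i h
      rw [PySem.List.pyRange_one_cons (by omega)]
      simp only [List.take_succ_cons, List.map_cons, ih (cur + 1) e]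
      refine Prod.ext rfl ?_
      simp only
      omega
    · rename_i h
      rw [PySem.List.pyRange_one_eq_nil (by omega)]
      simp only [List.take_nil, List.map_nil]
      refine Prod.ext rfl ?_
      simp only
      omega

theorem pyRange_drop (k : Nat) : ∀ a b : Int,
    (PySem.List.pyRange a b 1).drop k = PySem.List.pyRange (a + (min k (b - a).toNat : Nat)) b 1 := by
  induction k with
  | zero => intro a b; simp
  | succ k ih =>
    intro a b
    by_cases h : a < b
    · rw [PySem.List.pyRange_one_cons h, List.drop_succ_cons, ih (a + 1) b]
      congr 1
      omega
    · rw [PySem.List.pyRange_one_eq_nil (by omega)]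
      have : a + (min (k + 1) (b - a).toNat : Nat) = a := by omega
      rw [List.drop_nil, this, PySem.List.pyRange_one_eq_nil (by omega)]

theorem outer_eq_rows (fuel : Nat) : ∀ (cur : Int) (n : Nat) (e : Int),
    (e + 1 - cur).toNat ≤ fuel →
    spruceOuter cur n e = rowsD ((PySem.List.pyRange cur (e + 1) 1).map PySem.Int.toStr) n := by
  induction fuel with
  | zero =>
    intro cur n e hf
    have h : ¬ cur ≤ e := by omega
    rw [spruceOuter, dif_neg h, PySem.List.pyRange_one_eq_nil (by omega)]
    simp [rowsD_nil]
  | succ fuel ih =>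
    intro cur n e hf
    by_cases h : cur ≤ e
    · rw [spruceOuter, dif_pos h, spruceInner_spec]
      dsimp only
      conv_rhs => rw [PySem.List.pyRange_one_cons (show cur < e + 1 by omega), List.map_cons,
        rowsD_cons]
      rw [← List.map_cons, ← PySem.List.pyRange_one_cons (show cur < e + 1 by omega),
          ← List.map_take, ← List.map_drop, pyRange_drop]
      exact congrArg₂ _ rfl (ih _ (n + 1) e (by omega))
    · rw [spruceOuter, dif_neg h, PySem.List.pyRange_one_eq_nil (by omega)]
      simp [rowsD_nil]

-- ===== VERDICT (by name: the statement is the Claim_ definition above) =====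
theorem spruce_spec : Claim_equal_spruce := by
  intro e _
  unfold Spec_spruce spruce spruce_alt
  simp only [spruceRows_eq_rowsD, List.drop_zero]
  rw [outer_eq_rows (e + 1 - 1).toNat 1 0 e (by omega)]
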